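-- pv_equiv track=rewrite | github.com/miliar/Code_Jam_Webscraper | solutions_python/Problem_200/3215.py | tidy_split
-- ===== SOURCE A (Python) =====
-- from collections import deque
--
-- def tidy_split(s):
--     """Splits the input into a tidy and untidy section"""
--     tidy = []
--     untidy = deque(s)
--
--     # Skip tidy section
--     while untidy:
--         digit = untidy[0]
--         next_digit = untidy[1] if len(untidy) >= 2 else None
--         if next_digit is None or int(digit) <= int(next_digit):
--             tidy.append(digit)
--             untidy.popleft()
--         else:
--             break
--     return [''.join(tidy), ''.join(untidy)]
-- ===== SOURCE B (Python) =====
-- def tidy_split(s):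
--     """Splits the input into a tidy and untidy section"""
--     n = len(s)
--     cut = next((i for i in range(n - 1) if int(s[i]) > int(s[i + 1])), n)
--     return [s[:cut], s[cut:]]
-- ===== Notes on version B (the rewrite author's own statement) =====
-- stated objective: simpler
-- what changed: Replaces the deque-draining while loop that copies characters into a tidy list and joins both containers by a single next()-over-range scan that finds the index of the first descent and returns the two slices s[:cut], s[cut:]; only an integer index is maintained.
import Mathlib
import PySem

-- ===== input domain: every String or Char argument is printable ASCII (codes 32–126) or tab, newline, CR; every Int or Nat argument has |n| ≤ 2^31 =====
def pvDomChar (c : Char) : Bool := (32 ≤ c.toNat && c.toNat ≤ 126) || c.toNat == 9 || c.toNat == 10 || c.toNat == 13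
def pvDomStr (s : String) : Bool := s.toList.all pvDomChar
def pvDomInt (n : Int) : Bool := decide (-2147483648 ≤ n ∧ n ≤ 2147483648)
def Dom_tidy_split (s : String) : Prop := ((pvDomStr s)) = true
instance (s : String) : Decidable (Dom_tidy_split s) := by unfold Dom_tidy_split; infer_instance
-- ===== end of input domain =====

-- B replaces A's deque-draining accumulator loop by computing the cut index of the first
-- descent and slicing; objective: simpler.  int(c) is ported via PySem.Int.ofStr?; the
-- .getD 0 default is only reached where Python raises ValueError, which Pre_ excludes.
def pyIntOfChar (c : Char) : Int := (PySem.Int.ofStr? (String.mk [c])).getD 0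

-- ===== PORT A =====
-- the while loop over (tidy, untidy); deque(s) = s.toList, ''.join = String.mk
def tidyGo (tidy : List Char) (untidy : List Char) : List String :=
  match untidy with
  | [] => [String.mk tidy, String.mk []]
  | d :: rest =>
    match rest with
    | [] => tidyGo (tidy ++ [d]) rest          -- next_digit is None: append, popleft
    | d2 :: _ =>
      if pyIntOfChar d ≤ pyIntOfChar d2 then tidyGo (tidy ++ [d]) rest
      else [String.mk tidy, String.mk (d :: rest)]

def tidy_split (s : String) : List String := tidyGo [] s.toList

-- ===== PORT B =====
-- next((i for i in range(n-1) if int(s[i]) > int(s[i+1])), n): scan the indices of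
-- range(n-1) for the first descent, else default n
def findCutGo (l : List Char) (idxs : List Nat) : Nat :=
  match idxs with
  | [] => l.length
  | i :: rest =>
    if pyIntOfChar l[i]! > pyIntOfChar l[i + 1]! then i else findCutGo l rest

-- s[:cut] / s[cut:] with 0 ≤ cut ≤ len s are exactly take/drop
def tidy_split_alt (s : String) : List String :=
  let l := s.toList
  let cut := findCutGo l (List.range (l.length - 1))
  [String.mk (l.take cut), String.mk (l.drop cut)]

-- ===== PRECONDITION & SPEC =====
-- Pre_ excludes exactly the inputs on which A raises ValueError: strings of length ≥ 2 that
-- contain a non-digit and whose leading digit run is non-decreasing (so the scan reaches a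
-- non-digit character and int() fails there).  B raises on exactly the same inputs.
def Pre_tidy_split (s : String) : Prop :=
  s.toList.length ≤ 1 ∨ (s.toList.all Char.isDigit) = true ∨
    (((s.toList.takeWhile Char.isDigit).zip (s.toList.takeWhile Char.isDigit).tail).any
      (fun p => decide (p.2 < p.1))) = true
instance (s : String) : Decidable (Pre_tidy_split s) := by unfold Pre_tidy_split; infer_instance
def pvWitness_tidy_split : String := "21"

def Spec_tidy_split (s : String) (out : List String) : Prop := out = tidy_split_alt s
instance (s : String) (out : List String) : Decidable (Spec_tidy_split s out) := by unfold Spec_tidy_split; infer_instance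

-- ===== CLAIM (what is proved, stated in full; the proofs are below) =====
def Claim_equal_tidy_split : Prop := ∀ (s : String), Dom_tidy_split s → Pre_tidy_split s → Spec_tidy_split s (tidy_split s)

-- ===== LEMMAS AND PROOFS =====

-- loop invariant: after consuming i characters A's state is (take i, drop i), and from
-- there it produces exactly the cut B's scan computes over the remaining indices
theorem tidyGo_findCut (l : List Char) :
    ∀ k i, i ≤ l.length → l.length - 1 - i = k →
      tidyGo (l.take i) (l.drop i) =
        [String.mk (l.take (findCutGo l (List.range' i k))),
         String.mk (l.drop (findCutGo l (List.range' i k)))] := by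
  intro k
  induction k with
  | zero =>
    intro i hi h0
    simp only [List.range'_zero, findCutGo]
    by_cases hlen : i = l.length
    · subst hlen
      simp [tidyGo]
    · have hone : i + 1 = l.length := by omega
      have hilt : i < l.length := by omega
      rw [List.drop_eq_getElem_cons hilt]
      have hdrop : l.drop (i + 1) = [] := by
        apply List.drop_eq_nil_of_le; omega
      rw [hdrop, tidyGo, tidyGo]
      have htake : l.take i ++ [l[i]] = l.take (i + 1) := by
        rw [List.take_succ, List.getElem?_eq_getElem hilt]
        rfl
      rw [htake, hone]
      simp
  | succ k ih =>
    intro i hi hk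
    have hilt : i < l.length := by omega
    have h2 : i + 1 < l.length := by omega
    rw [List.range'_succ, findCutGo]
    rw [getElem!_pos l i hilt, getElem!_pos l (i + 1) h2]
    rw [List.drop_eq_getElem_cons hilt, List.drop_eq_getElem_cons h2, tidyGo]
    by_cases hc : pyIntOfChar l[i] > pyIntOfChar l[i + 1]
    · simp only [hc, if_true, not_le.mpr hc, if_false]
      rw [← List.drop_eq_getElem_cons h2, ← List.drop_eq_getElem_cons hilt]
    · have hle : pyIntOfChar l[i] ≤ pyIntOfChar l[i + 1] := not_lt.mp hc
      simp only [hle, if_true, hc, if_false]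
      have htake : l.take i ++ [l[i]] = l.take (i + 1) := by
        rw [List.take_succ, List.getElem?_eq_getElem hilt]
        rfl
      rw [htake, ← List.drop_eq_getElem_cons h2]
      exact ih (i + 1) (by omega) (by omega)

-- ===== VERDICT (by name: the statement is the Claim_ definition above) =====
theorem tidy_split_spec : Claim_equal_tidy_split := by
  intro s _ _
  unfold Spec_tidy_split tidy_split tidy_split_alt
  simpa [List.range_eq_range'] using
    tidyGo_findCut s.toList (s.toList.length - 1) 0 (by omega) (by omega)
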